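-- pv_equiv track=rewrite | github.com/bamherndon/BricklinkHelper | bulk_order.py | group_by_theme
-- ===== SOURCE A (Python) =====
-- def top_cat_id(item: dict) -> int:
--     cat_str = item.get("categoryString", "")
--     try:
--         return int(cat_str.split(".")[0])
--     except (ValueError, IndexError):
--         return 0
--
-- def group_by_theme(items: list[dict], cat_map: dict[int, str]) -> list[tuple[str, list[dict]]]:
--     """Return [(theme_name, [items])] sorted by count descending."""
--     from collections import defaultdict
--     groups: dict[str, list[dict]] = defaultdict(list)
--     for item in items:
--         cat_id = top_cat_id(item)
--         name   = cat_map.get(cat_id, f"Category {cat_id}" if cat_id else "Unknown")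
--         groups[name].append(item)
--     return sorted(groups.items(), key=lambda x: (-len(x[1]), x[0]))
-- ===== SOURCE B (Python) =====
-- from itertools import groupby
--
--
-- def top_cat_id(item: dict) -> int:
--     cat_str = item.get("categoryString", "")
--     try:
--         return int(cat_str.split(".")[0])
--     except (ValueError, IndexError):
--         return 0
--
--
-- def group_by_theme(items: list[dict], cat_map: dict[int, str]) -> list[tuple[str, list[dict]]]:
--     """Return [(theme_name, [items])] sorted by count descending."""
--     def theme_name(item):
--         cat_id = top_cat_id(item)
--         return cat_map.get(cat_id, f"Category {cat_id}" if cat_id else "Unknown")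
--
--     keyed = [(theme_name(item), item) for item in items]
--     keyed.sort(key=lambda p: p[0])          # stable: within a theme, original order kept
--     grouped = [(name, [item for _, item in run])
--                for name, run in groupby(keyed, key=lambda p: p[0])]
--     grouped.sort(key=lambda g: (-len(g[1]), g[0]))
--     return grouped
-- ===== Notes on version B (the rewrite author's own statement) =====
-- stated objective: alternative
-- what changed: Replaces A's defaultdict single-pass hash grouping with sort-then-groupby: items are keyed by theme name, stably sorted by name, sliced into runs by itertools.groupby, then the (name, group) pairs are sorted by (-count, name) exactly as A does.
import Mathlib
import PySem

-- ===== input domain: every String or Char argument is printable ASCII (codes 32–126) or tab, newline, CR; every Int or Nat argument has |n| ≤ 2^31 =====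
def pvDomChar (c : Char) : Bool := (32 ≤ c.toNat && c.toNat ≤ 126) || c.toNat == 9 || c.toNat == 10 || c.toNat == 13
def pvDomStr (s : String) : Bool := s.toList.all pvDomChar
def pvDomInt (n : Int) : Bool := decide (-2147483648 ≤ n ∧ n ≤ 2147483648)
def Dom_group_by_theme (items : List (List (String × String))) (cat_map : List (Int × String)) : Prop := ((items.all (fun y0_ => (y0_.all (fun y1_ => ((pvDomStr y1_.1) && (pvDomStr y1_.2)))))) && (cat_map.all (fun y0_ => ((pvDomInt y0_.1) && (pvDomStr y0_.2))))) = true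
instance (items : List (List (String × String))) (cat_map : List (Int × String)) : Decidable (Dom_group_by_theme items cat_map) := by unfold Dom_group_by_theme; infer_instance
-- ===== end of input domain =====

-- B groups by sorting the (theme, item) pairs stably by theme and slicing runs (sort-then-groupby)
-- instead of A's dict-based single-pass grouping; objective: alternative algorithm, same cost class.

-- ===== PORT A =====
def top_cat_id (item : List (String × String)) : Int :=
  let cat_str := (PySem.Dict.mk item).getD "categoryString" ""
  let parts := (PySem.Str.split? cat_str ".").getD []
  match PySem.List.pyGet? parts 0 with
  | none => 0                                 -- IndexError → 0
  | some s =>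
    match PySem.Int.ofStr? s with
    | none => 0                               -- ValueError → 0
    | some n => n

def group_by_theme (items : List (List (String × String))) (cat_map : List (Int × String)) : List (String × (List (List (String × String)))) :=
  let groups := items.foldl (fun d item =>
      let cat_id := top_cat_id item
      let name := (PySem.Dict.mk cat_map).getD cat_id
        (if cat_id ≠ 0 then "Category " ++ PySem.Int.toStr cat_id else "Unknown")
      d.modify name [] (fun g => g ++ [item])) PySem.Dict.empty
  PySem.List.sorted2 groups.items (fun x => -((x.2.length : Int))) (fun x => x.1)

-- ===== PORT B =====
def top_cat_id_alt (item : List (String × String)) : Int :=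
  let cat_str := (PySem.Dict.mk item).getD "categoryString" ""
  let parts := (PySem.Str.split? cat_str ".").getD []
  match PySem.List.pyGet? parts 0 with
  | none => 0
  | some s =>
    match PySem.Int.ofStr? s with
    | none => 0
    | some n => n

def theme_name_alt (cat_map : List (Int × String)) (item : List (String × String)) : String :=
  let cat_id := top_cat_id_alt item
  (PySem.Dict.mk cat_map).getD cat_id
    (if cat_id ≠ 0 then "Category " ++ PySem.Int.toStr cat_id else "Unknown")

-- itertools.groupby over a list already sorted by the key: slice off maximal runs of equal first component
def groupRuns : List (String × (List (String × String))) → List (String × (List (List (String × String))))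
  | [] => []
  | (n, it) :: rest =>
      (n, it :: (rest.takeWhile (fun p => p.1 == n)).map (·.2)) ::
      groupRuns (rest.dropWhile (fun p => p.1 == n))
  termination_by l => l.length
  decreasing_by
    simp only [List.length_cons]
    exact Nat.lt_succ_of_le (List.length_dropWhile_le _ _)

def group_by_theme_alt (items : List (List (String × String))) (cat_map : List (Int × String)) : List (String × (List (List (String × String)))) :=
  let keyed := items.map (fun item => (theme_name_alt cat_map item, item))
  let byName := PySem.List.sorted keyed (fun p => p.1)
  let grouped := groupRuns byName
  PySem.List.sorted2 grouped (fun g => -((g.2.length : Int))) (fun g => g.1)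

-- ===== PRECONDITION & SPEC =====
def Spec_group_by_theme (items : List (List (String × String))) (cat_map : List (Int × String)) (out : List (String × (List (List (String × String))))) : Prop := out = group_by_theme_alt items cat_map
instance (items : List (List (String × String))) (cat_map : List (Int × String)) (out : List (String × (List (List (String × String))))) : Decidable (Spec_group_by_theme items cat_map out) := by unfold Spec_group_by_theme; infer_instance

-- ===== CLAIM (what is proved, stated in full; the proofs are below) =====
def Claim_equal_group_by_theme : Prop := ∀ (items : List (List (String × String))) (cat_map : List (Int × String)), Dom_group_by_theme items cat_map → Spec_group_by_theme items cat_map (group_by_theme items cat_map)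

-- ===== LEMMAS AND PROOFS =====

-- the per-theme group, in original item order
def pvGrp (cat_map : List (Int × String)) (items : List (List (String × String))) (n : String) : List (List (String × String)) :=
  items.filter (fun it => theme_name_alt cat_map it == n)

-- A's dict, characterised
lemma A_items_eq (items : List (List (String × String))) (cat_map : List (Int × String)) :
    (items.foldl (fun d item =>
        let cat_id := top_cat_id item
        let name := (PySem.Dict.mk cat_map).getD cat_id
          (if cat_id ≠ 0 then "Category " ++ PySem.Int.toStr cat_id else "Unknown")
        d.modify name [] (fun g => g ++ [item])) PySem.Dict.empty).items
      = (PySem.Set.ofList (items.map (theme_name_alt cat_map))).map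
          (fun n => (n, pvGrp cat_map items n)) := by
  have hbody : (fun (d : PySem.Dict String (List (List (String × String)))) item =>
        let cat_id := top_cat_id item
        let name := (PySem.Dict.mk cat_map).getD cat_id
          (if cat_id ≠ 0 then "Category " ++ PySem.Int.toStr cat_id else "Unknown")
        d.modify name [] (fun g => g ++ [item]))
      = fun d item => d.modify (theme_name_alt cat_map item) [] (fun g => g ++ [item]) := rfl
  rw [hbody]
  set d := items.foldl (fun d item => d.modify (theme_name_alt cat_map item) [] (fun g => g ++ [item])) PySem.Dict.empty with hd
  have hkeys : d.keys = PySem.Set.ofList (items.map (theme_name_alt cat_map)) := by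
    rw [hd, PySem.Dict.keys_foldl_modify_key items (theme_name_alt cat_map) [] (fun _ it => fun g => g ++ [it]) PySem.Dict.empty, PySem.Dict.keys_empty]
    rw [PySem.Set.ofList_eq_foldl]; rfl
  have hnd : d.keys.Nodup := by
    rw [hd]; exact PySem.Dict.nodup_keys_foldl_modify_key _ _ _ _ _ PySem.Dict.nodup_keys_empty
  have hgetD : ∀ n, d.getD n [] = pvGrp cat_map items n := by
    intro n
    have hmap : d = (items.map (fun it => (theme_name_alt cat_map it, it))).foldl
        (fun d p => d.modify p.1 [] (fun g => g ++ [p.2])) PySem.Dict.empty := by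
      rw [hd, List.foldl_map]
    rw [hmap, PySem.Dict.getD_foldl_modify_append, PySem.Dict.getD_empty, List.nil_append]
    rw [List.filter_map, pvGrp]
    simp [Function.comp_def]
  rw [PySem.Dict.items_eq_map_keys d hnd [], hkeys]
  exact List.map_congr_left (fun k _ => by rw [hgetD k])

lemma filt_insertBy_eq {α : Type} (key : α → String) (c : String) (x : α) (ys : List α)
    (h : ys.Pairwise (fun a b => key a ≤ key b)) (hx : key x = c) :
    (PySem.List.insertBy (fun a b => decide (key a < key b)) x ys).filter (fun a => key a == c)
      = ys.filter (fun a => key a == c) ++ [x] := by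
  induction ys with
  | nil => simp [PySem.List.insertBy, hx]
  | cons y ys ih =>
    rw [PySem.List.insertBy.eq_2]
    by_cases hlt : key x < key y
    · simp only [decide_eq_true_eq, hlt, if_pos]
      have hnil : (y :: ys).filter (fun a => key a == c) = [] := by
        rw [List.filter_eq_nil_iff]
        intro a ha
        have hle : key y ≤ key a := by
          rcases List.mem_cons.mp ha with rfl | ha'
          · exact le_refl _
          · exact (List.pairwise_cons.mp h).1 a ha'
        have : c < key a := lt_of_lt_of_le (hx ▸ hlt) hle
        simp [ne_of_gt this]
      rw [List.filter_cons_of_pos (by simp [hx]), hnil]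
      simp
    · simp only [decide_eq_true_eq, hlt, if_false]
      rw [List.filter_cons, List.filter_cons]
      by_cases hy : key y == c
      · simp only [hy, if_pos]
        rw [ih (List.pairwise_cons.mp h).2]
        simp
      · simp only [hy]
        exact ih (List.pairwise_cons.mp h).2
  
lemma filt_insertBy_ne {α : Type} (key : α → String) (c : String) (x : α) (ys : List α)
    (hx : key x ≠ c) :
    (PySem.List.insertBy (fun a b => decide (key a < key b)) x ys).filter (fun a => key a == c)
      = ys.filter (fun a => key a == c) := by
  induction ys with
  | nil => simp [PySem.List.insertBy, hx]
  | cons y ys ih =>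
    rw [PySem.List.insertBy.eq_2]
    by_cases hlt : key x < key y
    · simp [hlt, hx]
    · simp only [decide_eq_true_eq, hlt, if_false]
      rw [List.filter_cons, List.filter_cons, ih]

lemma filt_foldl_insertBy {α : Type} (key : α → String) (c : String) (xs : List α) :
    ∀ acc : List α, acc.Pairwise (fun a b => key a ≤ key b) →
    (xs.foldl (fun acc x => PySem.List.insertBy (fun a b => decide (key a < key b)) x acc) acc).filter (fun a => key a == c)
      = acc.filter (fun a => key a == c) ++ xs.filter (fun a => key a == c) := by
  induction xs with
  | nil => intro acc _; simp
  | cons x xs ih =>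
    intro acc hacc
    rw [List.foldl_cons]
    rw [ih _ (PySem.List.insertBy_pairwise_le key x acc hacc)]
    rw [List.filter_cons]
    by_cases hx : key x = c
    · rw [filt_insertBy_eq key c x acc hacc hx]
      simp [hx]
    · rw [filt_insertBy_ne key c x acc hx]
      simp [hx]

lemma filter_sorted_key {α : Type} (xs : List α) (key : α → String) (c : String) :
    (PySem.List.sorted xs key).filter (fun a => key a == c) = xs.filter (fun a => key a == c) := by
  rw [PySem.List.sorted_eq_foldl_insertBy]
  rw [filt_foldl_insertBy key c xs [] (List.Pairwise.nil)]
  simp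

lemma groupRuns_fst_mem (l : List (String × (List (String × String)))) (m : String) :
    m ∈ (groupRuns l).map (·.1) ↔ m ∈ l.map (·.1) := by
  induction l using groupRuns.induct with
  | case1 => simp [groupRuns]
  | case2 n it rest ih =>
    rw [groupRuns]
    simp only [List.map_cons, List.mem_cons, ih]
    constructor
    · rintro (rfl | h)
      · exact Or.inl rfl
      · right
        have : m ∈ (rest.dropWhile (fun p => p.1 == n)).map (·.1) := h
        rcases List.mem_map.mp this with ⟨p, hp, rfl⟩
        exact List.mem_map.mpr ⟨p, (List.dropWhile_sublist _).subset hp, rfl⟩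
    · rintro (rfl | h)
      · exact Or.inl rfl
      · rcases List.mem_map.mp h with ⟨p, hp, rfl⟩
        by_cases hpn : p.1 = n
        · exact Or.inl hpn
        · right
          have hsplit := List.takeWhile_append_dropWhile (p := fun p => p.1 == n) (l := rest)
          have : p ∈ rest.takeWhile (fun p => p.1 == n) ∨ p ∈ rest.dropWhile (fun p => p.1 == n) := by
            rw [← List.mem_append, hsplit]; exact hp
        
          rcases this with htw | hdw
          · exact absurd (by simpa using List.mem_takeWhile_imp htw) hpn
          · exact List.mem_map.mpr ⟨p, hdw, rfl⟩

lemma groupRuns_rest_gt (n : String) (it : List (String × String))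
    (rest : List (String × (List (String × String))))
    (h : List.Pairwise (fun a b => a.1 ≤ b.1) ((n, it) :: rest)) :
    ∀ p ∈ rest.dropWhile (fun p => p.1 == n), n < p.1 := by
  intro p hp
  rcases hdw : rest.dropWhile (fun p => p.1 == n) with _ | ⟨q, t⟩
  · rw [hdw] at hp; simp at hp
  · have hne : rest.dropWhile (fun p => p.1 == n) ≠ [] := by rw [hdw]; exact List.cons_ne_nil q t
    have h0 := List.head_dropWhile_not (fun p : String × List (String × String) => p.1 == n) hne
    have hhead : (rest.dropWhile (fun p => p.1 == n)).head hne = q := by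
      simp [hdw]
    rw [hhead] at h0
    have hq_ne : ¬ (q.1 = n) := by simpa using h0
    have hrest := (List.pairwise_cons.mp h).1
    have hq_mem : q ∈ rest := (List.dropWhile_sublist _).subset (by rw [hdw]; exact List.mem_cons_self)
    have hq_gt : n < q.1 := lt_of_le_of_ne (hrest q hq_mem) (Ne.symm hq_ne)
    have hpw : List.Pairwise (fun a b => a.1 ≤ b.1) (q :: t) := by
      rw [← hdw]
      exact List.Pairwise.sublist (List.dropWhile_sublist _) ((List.pairwise_cons.mp h).2)
    rw [hdw] at hp
    rcases List.mem_cons.mp hp with rfl | hp'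
    · exact hq_gt
    · exact lt_of_lt_of_le hq_gt ((List.pairwise_cons.mp hpw).1 p hp')

lemma groupRuns_fst_nodup (l : List (String × (List (String × String))))
    (h : l.Pairwise (fun a b => a.1 ≤ b.1)) : ((groupRuns l).map (·.1)).Nodup := by
  induction l using groupRuns.induct with
  | case1 => simp [groupRuns]
  | case2 n it rest ih =>
    rw [groupRuns]
    simp only [List.map_cons, List.nodup_cons]
    constructor
    · intro hmem
      have := (groupRuns_fst_mem _ n).mp hmem
      rcases List.mem_map.mp this with ⟨p, hp, hfst⟩
      exact absurd (hfst ▸ groupRuns_rest_gt n it rest h p hp) (lt_irrefl n)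
    · exact ih (List.Pairwise.sublist (List.dropWhile_sublist _) ((List.pairwise_cons.mp h).2))

lemma groupRuns_elem (l : List (String × (List (String × String))))
    (h : l.Pairwise (fun a b => a.1 ≤ b.1)) :
    ∀ q ∈ groupRuns l, q = (q.1, (l.filter (fun p => p.1 == q.1)).map (·.2)) := by
  induction l using groupRuns.induct with
  | case1 => simp [groupRuns]
  | case2 n it rest ih =>
    intro q hq
    rw [groupRuns] at hq
    have hsplit := List.takeWhile_append_dropWhile (p := fun p => p.1 == n) (l := rest)
    rcases List.mem_cons.mp hq with rfl | hq'
    · -- the head run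
      simp only
      rw [List.filter_cons_of_pos (by simp)]
      congr 1
      rw [← hsplit, List.filter_append]
      have h1 : (rest.takeWhile (fun p => p.1 == n)).filter (fun p => p.1 == n)
          = rest.takeWhile (fun p => p.1 == n) := by
        rw [List.filter_eq_self]
        intro p hp
        have := List.mem_takeWhile_imp hp
        simpa using this
      have h2 : (rest.dropWhile (fun p => p.1 == n)).filter (fun p => p.1 == n) = [] := by
        rw [List.filter_eq_nil_iff]
        intro p hp
        simpa using ne_of_gt (groupRuns_rest_gt n it rest h p hp)
      rw [h1, h2, List.append_nil]
      simp
    · -- a later run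
      have hpw' := List.Pairwise.sublist (List.dropWhile_sublist (fun p => p.1 == n) (l := rest)) ((List.pairwise_cons.mp h).2)
      have hthis := ih hpw' q hq'
      have hq1 : n < q.1 := by
        have hm : q.1 ∈ (groupRuns (rest.dropWhile (fun p => p.1 == n))).map (·.1) :=
          List.mem_map.mpr ⟨q, hq', rfl⟩
        rcases List.mem_map.mp ((groupRuns_fst_mem _ _).mp hm) with ⟨p, hp, hfst⟩
        exact hfst ▸ groupRuns_rest_gt n it rest h p hp
      have h1 : (rest.takeWhile (fun p => p.1 == n)).filter (fun p => p.1 == q.1) = [] := by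
        rw [List.filter_eq_nil_iff]
        intro p hp
        have hpn := List.mem_takeWhile_imp hp
        simp only [beq_iff_eq] at hpn ⊢
        rw [hpn]; exact ne_of_lt hq1
      rw [List.filter_cons_of_neg (by simpa using ne_of_lt hq1)]
      conv_rhs => rw [← hsplit]
      rw [List.filter_append, h1, List.nil_append]
      exact hthis

def pvR (a b : String × (List (List (String × String)))) : Prop :=
  -((a.2.length : Int)) < -((b.2.length : Int)) ∨ (a.2.length = b.2.length ∧ a.1 ≤ b.1)

def pvBefore (a b : String × (List (List (String × String)))) : Bool :=
  decide (-((a.2.length : Int)) < -((b.2.length : Int))) ||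
    (!decide (-((b.2.length : Int)) < -((a.2.length : Int))) && decide (a.1 < b.1))

lemma pvBefore_true {a b} (h : pvBefore a b = true) : pvR a b := by
  unfold pvBefore at h
  unfold pvR
  simp only [Bool.or_eq_true, Bool.and_eq_true, Bool.not_eq_true', decide_eq_true_eq, decide_eq_false_iff_not] at h
  rcases h with h | ⟨h1, h2⟩
  · exact Or.inl h
  · by_cases hlt : -((a.2.length : Int)) < -((b.2.length : Int))
    · exact Or.inl hlt
    · exact Or.inr ⟨by omega, le_of_lt h2⟩

lemma pvBefore_false {a b} (h : pvBefore a b = false) : pvR b a := by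
  unfold pvBefore at h
  unfold pvR
  simp only [Bool.or_eq_false_iff, Bool.and_eq_false_iff, Bool.not_eq_false', decide_eq_true_eq, decide_eq_false_iff_not] at h
  rcases h with ⟨h1, h2 | h2⟩
  · exact Or.inl h2
  · by_cases hlt : -((b.2.length : Int)) < -((a.2.length : Int))
    · exact Or.inl hlt
    · exact Or.inr ⟨by omega, le_of_not_gt h2⟩

lemma pvBefore_trans {x y z} (h : pvBefore x y = true) (h2 : pvR y z) : pvR x z := by
  unfold pvBefore at h
  unfold pvR at h2 ⊢
  simp only [Bool.or_eq_true, Bool.and_eq_true, Bool.not_eq_true', decide_eq_true_eq, decide_eq_false_iff_not] at h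
  rcases h with h | ⟨ha, hb⟩
  · rcases h2 with h2 | ⟨h2, _⟩
    · exact Or.inl (by omega)
    · exact Or.inl (by omega)
  · rcases h2 with h2 | ⟨h2, h3⟩
    · exact Or.inl (by omega)
    · by_cases hlt : -((x.2.length : Int)) < -((z.2.length : Int))
      · exact Or.inl hlt
      · exact Or.inr ⟨by omega, le_of_lt (lt_of_lt_of_le hb h3)⟩

lemma pairwise_insertBy_pvR (x : String × (List (List (String × String)))) (ys)
    (h : ys.Pairwise pvR) : (PySem.List.insertBy pvBefore x ys).Pairwise pvR := by
  induction ys with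
  | nil => simp [PySem.List.insertBy]
  | cons y ys ih =>
    rw [PySem.List.insertBy.eq_2]
    rcases hb : pvBefore x y with _ | _
    · simp only [Bool.false_eq_true, if_false]
      rw [List.pairwise_cons] at h ⊢
      refine ⟨?_, ih h.2⟩
      intro z hz
      rcases (PySem.List.mem_insertBy pvBefore x z ys).mp hz with rfl | hz'
      · exact pvBefore_false hb
      · exact h.1 z hz'
    · simp only [if_true]
      rw [List.pairwise_cons]
      refine ⟨?_, h⟩
      intro z hz
      rcases List.mem_cons.mp hz with rfl | hz'
      · exact pvBefore_true hb
      · exact pvBefore_trans hb ((List.pairwise_cons.mp h).1 z hz')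

lemma sorted2_pairwise_R (xs : List (String × (List (List (String × String))))) :
    (PySem.List.sorted2 xs (fun x => -((x.2.length : Int))) (fun x => x.1)).Pairwise pvR := by
  have hdef : PySem.List.sorted2 xs (fun x => -((x.2.length : Int))) (fun x => x.1)
      = xs.foldl (fun acc x => PySem.List.insertBy pvBefore x acc) [] := rfl
  rw [hdef]
  suffices h : ∀ (ys : List _) (acc : List (String × (List (List (String × String))))), acc.Pairwise pvR →
      (ys.foldl (fun acc x => PySem.List.insertBy pvBefore x acc) acc).Pairwise pvR from
    h xs [] List.Pairwise.nil
  intro ys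
  induction ys with
  | nil => intro acc h; simpa using h
  | cons x ys ih =>
    intro acc h
    rw [List.foldl_cons]
    exact ih _ (pairwise_insertBy_pvR x acc h)

-- ===== VERDICT (by name: the statement is the Claim_ definition above) =====
theorem group_by_theme_spec : Claim_equal_group_by_theme := by
  intro items cat_map _dom
  unfold Spec_group_by_theme group_by_theme group_by_theme_alt
  show PySem.List.sorted2
      ((items.foldl (fun d item =>
        let cat_id := top_cat_id item
        let name := (PySem.Dict.mk cat_map).getD cat_id
          (if cat_id ≠ 0 then "Category " ++ PySem.Int.toStr cat_id else "Unknown")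
        d.modify name [] (fun g => g ++ [item])) PySem.Dict.empty).items)
      (fun x => -((x.2.length : Int))) (fun x => x.1)
    = PySem.List.sorted2
        (groupRuns (PySem.List.sorted (items.map (fun item => (theme_name_alt cat_map item, item))) (fun p => p.1)))
        (fun g => -((g.2.length : Int))) (fun g => g.1)
  rw [A_items_eq]
  set nm := theme_name_alt cat_map with hnm
  set keyed := items.map (fun it => (nm it, it)) with hkeyed
  set byName := PySem.List.sorted keyed (fun p => p.1) with hbyName
  set LB := groupRuns byName with hLB
  set K := PySem.Set.ofList (items.map nm) with hK
  set LA := K.map (fun n => (n, pvGrp cat_map items n)) with hLA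
  have hpw : byName.Pairwise (fun a b => a.1 ≤ b.1) :=
    PySem.List.sorted_pairwise keyed (fun p => p.1)
  -- every element of LB is (n, pvGrp n)
  have hGB : ∀ q ∈ LB, q = (q.1, pvGrp cat_map items q.1) := by
    intro q hq
    have h1 := groupRuns_elem byName hpw q hq
    rw [filter_sorted_key keyed (fun p => p.1) q.1] at h1
    rw [hkeyed, List.filter_map, List.map_map] at h1
    simpa [Function.comp_def, pvGrp] using h1
  -- first components of LB are a permutation of K
  have hKnd : K.Nodup := PySem.Set.nodup_ofList _
  have hBnd : (LB.map (·.1)).Nodup := groupRuns_fst_nodup byName hpw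
  have hpermK : (LB.map (·.1)).Perm K := by
    rw [List.perm_ext_iff_of_nodup hBnd hKnd]
    intro m
    rw [groupRuns_fst_mem]
    have h2 : (byName.map (·.1)).Perm (keyed.map (·.1)) :=
      (PySem.List.sorted_perm keyed (fun p => p.1) false).map _
    rw [h2.mem_iff, PySem.Set.mem_ofList]
    rw [hkeyed, List.map_map]
    simp [Function.comp_def]
  -- LA and LB are permutations of each other
  have hLBmap : LB = (LB.map (·.1)).map (fun n => (n, pvGrp cat_map items n)) := by
    rw [List.map_map]
    have h1 : LB.map (fun q => (q.1, pvGrp cat_map items q.1)) = LB.map id :=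
      List.map_congr_left (fun q hq => (hGB q hq).symm)
    rw [show ((fun n => (n, pvGrp cat_map items n)) ∘ fun x => x.1)
          = (fun q : String × List (List (String × String)) => (q.1, pvGrp cat_map items q.1)) from rfl]
    rw [h1, List.map_id]
  have hperm : LA.Perm LB := by
    rw [hLA, hLBmap]
    exact (hpermK.map (fun n => (n, pvGrp cat_map items n))).symm
  -- both results are pairwise-ordered permutations of the same list
  have hP1 := sorted2_pairwise_R LA
  have hP2 := sorted2_pairwise_R LB
  have hSperm : (PySem.List.sorted2 LA (fun x => -((x.2.length : Int))) (fun x => x.1)).Perm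
      (PySem.List.sorted2 LB (fun x => -((x.2.length : Int))) (fun x => x.1)) :=
    ((PySem.List.sorted2_perm LA _ _ false).trans hperm).trans
      (PySem.List.sorted2_perm LB _ _ false).symm
  refine List.Perm.eq_of_pairwise ?_ hP1 hP2 hSperm
  intro a b ha hb hab hba
  have haLA : a ∈ LA := ((PySem.List.sorted2_perm LA _ _ false).mem_iff).mp ha
  have hbLB : b ∈ LB := ((PySem.List.sorted2_perm LB _ _ false).mem_iff).mp hb
  have hfst : a.1 = b.1 := by
    rcases hab with h1 | ⟨h1, h2⟩ <;> rcases hba with h3 | ⟨h3, h4⟩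
    · omega
    · omega
    · omega
    · exact le_antisymm h2 h4
  have haG : a = (a.1, pvGrp cat_map items a.1) := by
    rw [hLA] at haLA
    rcases List.mem_map.mp haLA with ⟨n, _, rfl⟩
    rfl
  have hbG : b = (b.1, pvGrp cat_map items b.1) := hGB b hbLB
  rw [haG, hbG, hfst]
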